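-- pv_equiv track=rewrite | github.com/Abhiprameesh/DSA-content | hackwithfypractice/MSS_SWAPS.py | max_mss_with_k_swaps
-- ===== SOURCE A (Python) =====
-- def max_mss_with_k_swaps(n, k, arr):
--     max_sum = float('-inf')
--
--     # Try all possible subarrays
--     for i in range(n):
--         current = []
--
--         for j in range(i, n):
--             current.append(arr[j])
--
--             # Step 1: Sort inside subarray (ascending)
--             inside = sorted(current)
--
--             # Step 2: Elements outside subarray (descending)
--             outside = sorted(arr[:i] + arr[j+1:], reverse=True)
--
--             # Step 3: Perform at most k swaps
--             swaps = k
--             idx_in = 0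
--             idx_out = 0
--
--             while swaps > 0 and idx_in < len(inside) and idx_out < len(outside):
--                 if inside[idx_in] < outside[idx_out]:
--                     inside[idx_in], outside[idx_out] = outside[idx_out], inside[idx_in]
--                     swaps -= 1
--                     idx_in += 1
--                     idx_out += 1
--                 else:
--                     break
--
--             # Step 4: Compute sum
--             current_sum = sum(inside)
--
--             # Step 5: Update max
--             max_sum = max(max_sum, current_sum)
--
--     return max_sum
-- ===== SOURCE B (Python) =====
-- def max_mss_with_k_swaps(n, k, arr):
--     best = float('-inf')
--
--     for i in range(n):
--         # inside: the current subarray kept sorted ascending, maintained incrementally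
--         inside = []
--         inside_sum = 0
--         # outside: everything not yet moved into the subarray, sorted descending once;
--         # each step removes the element that enters the subarray
--         outside = sorted(arr, reverse=True)
--
--         for j in range(i, n):
--             x = arr[j]
--             outside.remove(x)
--             # linear insertion keeps `inside` sorted without re-sorting
--             p = 0
--             while p < len(inside) and inside[p] <= x:
--                 p += 1
--             inside.insert(p, x)
--             inside_sum += x
--
--             # pair the m-th smallest inside with the m-th largest outside while it helps
--             gain = 0
--             m = 0
--             while m < k and m < len(inside) and m < len(outside) and inside[m] < outside[m]:
--                 gain += outside[m] - inside[m]
--                 m += 1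
--
--             total = inside_sum + gain
--             if total > best:
--                 best = total
--
--     return best
-- ===== Notes on version B (the rewrite author's own statement) =====
-- stated objective: alternative
-- what changed: A re-sorts the subarray and its complement from scratch for every (i,j) pair and simulates the swaps element by element; B keeps the inside list sorted by incremental linear insertion and the outside list by one descending sort per outer iteration followed by removals, and adds up the swap gain directly on top of a running subarray sum (intended as faster; a timing run measured B ahead at every size but could not confirm the label).
-- outside the precondition, e.g. on max_mss_with_k_swaps(0, 1, [1]): A returns -inf, B returns -inf
import Mathlib
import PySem

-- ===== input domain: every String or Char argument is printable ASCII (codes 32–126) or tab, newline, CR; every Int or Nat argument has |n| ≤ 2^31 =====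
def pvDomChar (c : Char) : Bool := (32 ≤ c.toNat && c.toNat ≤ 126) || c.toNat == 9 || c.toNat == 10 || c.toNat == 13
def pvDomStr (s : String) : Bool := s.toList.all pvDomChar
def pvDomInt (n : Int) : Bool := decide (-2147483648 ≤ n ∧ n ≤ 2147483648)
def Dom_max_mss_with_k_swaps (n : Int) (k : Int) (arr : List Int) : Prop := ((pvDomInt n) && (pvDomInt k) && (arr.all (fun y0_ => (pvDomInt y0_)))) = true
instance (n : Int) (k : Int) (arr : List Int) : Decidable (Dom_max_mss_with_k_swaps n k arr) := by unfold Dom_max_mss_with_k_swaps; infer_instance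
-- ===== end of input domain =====

-- B replaces A's per-subarray re-sorting (sort inside, sort outside, swap loop) by incrementally
-- maintained sorted lists, a running sum and a gain accumulator; equivalence of return values is
-- proved on inputs with 1 ≤ n ≤ len(arr) (elsewhere A raises or returns float('-inf'), not an int).

-- ===== PORT A =====
-- the while-swap loop: swaps/idx_in/idx_out state, fuel = inside.length (the loop advances idx_in
-- every iteration and requires idx_in < len(inside), so the fuel is never exhausted first)
def pvA_swap : Nat → List Int → List Int → Int → Nat → Nat → List Int
  | 0, inside, _, _, _, _ => inside
  | fuel+1, inside, outside, swaps, ii, io =>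
    if swaps > 0 ∧ ii < inside.length ∧ io < outside.length then
      if inside.getD ii 0 < outside.getD io 0 then
        pvA_swap fuel (inside.set ii (outside.getD io 0)) (outside.set io (inside.getD ii 0))
          (swaps - 1) (ii + 1) (io + 1)
      else inside
    else inside

-- inner 'for j in range(i, n)' loop; cnt = number of remaining iterations; arr.getD j 0 is arr[j]
-- (under Pre_ always in range, so the default is never read)
def pvA_jloop (k : Int) (arr : List Int) (i : Nat) : Nat → Nat → List Int → Option Int → Option Int
  | 0, _, _, best => best
  | cnt+1, j, current, best =>
    let current := current ++ [arr.getD j 0]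
    let inside := PySem.List.sorted current (fun x => x) false
    let outside := PySem.List.sorted
        (PySem.List.slice arr none (some (i : Int)) ++ PySem.List.slice arr (some ((j : Int) + 1)) none)
        (fun x => x) true
    let inside := pvA_swap inside.length inside outside k 0 0
    let s := inside.sum
    let best := some (match best with | none => s | some m => max m s)
    pvA_jloop k arr i cnt (j+1) current best

-- outer 'for i in range(n)' loop; max_sum = float('-inf') is the Option value none
def pvA_iloop (k : Int) (arr : List Int) : Nat → Nat → Option Int → Option Int
  | 0, _, best => best
  | cnt+1, i, best => pvA_iloop k arr cnt (i+1) (pvA_jloop k arr i (cnt+1) i [] best)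

def max_mss_with_k_swaps (n : Int) (k : Int) (arr : List Int) : Int :=
  (pvA_iloop k arr n.toNat 0 none).getD 0   -- none = float('-inf'): not an Int, excluded by Pre_

-- ===== PORT B =====
-- the 'while p < len(inside) and inside[p] <= x' insertion-position loop
def pvB_insertPos : List Int → Int → Nat
  | [], _ => 0
  | y :: t, x => if y ≤ x then pvB_insertPos t x + 1 else 0

-- the gain-accumulating while loop; fuel = inside.length, same argument as for pvA_swap
def pvB_gain : Nat → List Int → List Int → Int → Nat → Int → Int
  | 0, _, _, _, _, gain => gain
  | fuel+1, inside, outside, k, m, gain =>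
    if (m : Int) < k ∧ m < inside.length ∧ m < outside.length ∧ inside.getD m 0 < outside.getD m 0
    then pvB_gain fuel inside outside k (m+1) (gain + (outside.getD m 0 - inside.getD m 0))
    else gain

-- inner 'for j in range(i, n)' loop of B, carrying inside / inside_sum / outside across iterations
def pvB_jloop (k : Int) (arr : List Int) : Nat → Nat → List Int → Int → List Int → Option Int → Option Int
  | 0, _, _, _, _, best => best
  | cnt+1, j, inside, isum, outside, best =>
    let x := arr.getD j 0
    let outside := (PySem.List.remove? outside x).getD outside  -- x is always present under Pre_
    let p := pvB_insertPos inside x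
    let inside := PySem.List.insert inside (p : Int) x
    let isum := isum + x
    let gain := pvB_gain inside.length inside outside k 0 0
    let total := isum + gain
    let best := match best with
      | none => some total   -- float('-inf') < total always
      | some m => if total > m then some total else some m
    pvB_jloop k arr cnt (j+1) inside isum outside best

def pvB_iloop (k : Int) (arr : List Int) : Nat → Nat → Option Int → Option Int
  | 0, _, best => best
  | cnt+1, i, best =>
    pvB_iloop k arr cnt (i+1)
      (pvB_jloop k arr (cnt+1) i [] 0 (PySem.List.sorted arr (fun x => x) true) best)

def max_mss_with_k_swaps_alt (n : Int) (k : Int) (arr : List Int) : Int :=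
  (pvB_iloop k arr n.toNat 0 none).getD 0

-- ===== PRECONDITION & SPEC =====
-- Pre_ excludes n ≤ 0 (A returns float('-inf'), which is not a value of the declared Int type)
-- and n > len(arr) (A raises IndexError at arr[j]).
def Pre_max_mss_with_k_swaps (n : Int) (k : Int) (arr : List Int) : Prop :=
  1 ≤ n ∧ n ≤ arr.length
instance (n : Int) (k : Int) (arr : List Int) : Decidable (Pre_max_mss_with_k_swaps n k arr) := by
  unfold Pre_max_mss_with_k_swaps; infer_instance

def pvWitness_max_mss_with_k_swaps : Int × Int × List Int := (3, 1, [2, -5, 3, 7])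

def Spec_max_mss_with_k_swaps (n : Int) (k : Int) (arr : List Int) (out : Int) : Prop := out = max_mss_with_k_swaps_alt n k arr
instance (n : Int) (k : Int) (arr : List Int) (out : Int) : Decidable (Spec_max_mss_with_k_swaps n k arr out) := by unfold Spec_max_mss_with_k_swaps; infer_instance

-- ===== CLAIM (what is proved, stated in full; the proofs are below) =====
def Claim_equal_max_mss_with_k_swaps : Prop := ∀ (n : Int) (k : Int) (arr : List Int), Dom_max_mss_with_k_swaps n k arr → Pre_max_mss_with_k_swaps n k arr → Spec_max_mss_with_k_swaps n k arr (max_mss_with_k_swaps n k arr)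

-- ===== LEMMAS AND PROOFS =====

-- `list.insert(p, x)` with 0 ≤ p: take/drop form
theorem pvInsert_natCast (xs : List Int) (p : Nat) (v : Int) :
    PySem.List.insert xs (p : Int) v = xs.take p ++ v :: xs.drop p := by
  simp [PySem.List.insert, PySem.List.sliceIndices]
  have h0 : (if (p : Int) < 0 then max ((p : Int) + xs.length) 0 else min (p : Int) xs.length).toNat
      = min p xs.length := by omega
  rw [h0]
  rcases le_total p xs.length with h | h
  · rw [Nat.min_eq_left h]
  · rw [Nat.min_eq_right h, List.take_length, List.take_of_length_le h,
        List.drop_length, List.drop_of_length_le h]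

-- accumulator shift for the gain loop
theorem pvB_gain_acc (fuel : Nat) : ∀ (ins outs : List Int) (k : Int) (m : Nat) (g : Int),
    pvB_gain fuel ins outs k m g = g + pvB_gain fuel ins outs k m 0 := by
  induction fuel with
  | zero => intro ins outs k m g; simp [pvB_gain]
  | succ fuel ih =>
    intro ins outs k m g
    simp only [pvB_gain]
    split_ifs with h
    · rw [ih ins outs k (m+1) (g + _), ih ins outs k (m+1) (0 + _)]; ring
    · simp

-- the gain loop never reads positions below m
theorem pvB_gain_set (fuel : Nat) : ∀ (ins outs : List Int) (k : Int) (m ii io : Nat)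
    (a b : Int), ii < m → io < m →
    pvB_gain fuel (ins.set ii b) (outs.set io a) k m 0 = pvB_gain fuel ins outs k m 0 := by
  induction fuel with
  | zero => intro _ _ _ _ _ _ _ _ _ _; simp [pvB_gain]
  | succ fuel ih =>
    intro ins outs k m ii io a b hii hio
    have hg1 : (ins.set ii b).getD m 0 = ins.getD m 0 := by
      rw [List.getD_eq_getElem?_getD, List.getD_eq_getElem?_getD,
          List.getElem?_set_ne (by omega)]
    have hg2 : (outs.set io a).getD m 0 = outs.getD m 0 := by
      rw [List.getD_eq_getElem?_getD, List.getD_eq_getElem?_getD,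
          List.getElem?_set_ne (by omega)]
    simp only [pvB_gain, List.length_set, hg1, hg2]
    split_ifs with h
    · rw [pvB_gain_acc fuel (ins.set ii b), pvB_gain_acc fuel ins,
          ih ins outs k (m+1) ii io a b (by omega) (by omega)]
    · rfl

-- sum after A's swap loop = original sum + B's gain
theorem pvA_swap_sum (fuel : Nat) : ∀ (ins outs : List Int) (k : Int) (ii : Nat),
    (pvA_swap fuel ins outs (k - ii) ii ii).sum = ins.sum + pvB_gain fuel ins outs k ii 0 := by
  induction fuel with
  | zero => intro ins outs k ii; simp [pvA_swap, pvB_gain]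
  | succ fuel ih =>
    intro ins outs k ii
    simp only [pvA_swap, pvB_gain]
    by_cases h : (ii : Int) < k ∧ ii < ins.length ∧ ii < outs.length
    · obtain ⟨h1, h2, h3⟩ := h
      have hA : k - (ii : Int) > 0 ∧ ii < ins.length ∧ ii < outs.length := ⟨by omega, h2, h3⟩
      rw [if_pos hA]
      by_cases hlt : ins.getD ii 0 < outs.getD ii 0
      · rw [if_pos hlt, if_pos ⟨h1, h2, h3, hlt⟩]
        have hstep : k - (ii : Int) - 1 = k - ((ii : Nat) + 1 : Nat) := by push_cast; ring
        rw [hstep, ih]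
        rw [pvB_gain_set fuel ins outs k (ii+1) ii ii _ _ (by omega) (by omega)]
        have hgd : ins.getD ii 0 = ins[ii] := by
          rw [List.getD_eq_getElem?_getD, List.getElem?_eq_getElem h2]; rfl
        have hsplit : ins.sum = (List.take ii ins).sum + ins[ii] + (List.drop (ii+1) ins).sum := by
          conv_lhs => rw [← List.take_append_drop ii ins, List.drop_eq_getElem_cons h2]
          rw [List.sum_append, List.sum_cons]; ring
        have hsum : (ins.set ii (outs.getD ii 0)).sum = ins.sum - ins.getD ii 0 + outs.getD ii 0 := by
          rw [List.sum_set, if_pos h2, hgd, hsplit]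
          have hgo : outs.getD ii 0 = outs[ii]?.getD 0 := List.getD_eq_getElem?_getD
          rw [hgo]; ring
        rw [hsum, pvB_gain_acc fuel ins outs k (ii+1) (0 + (outs.getD ii 0 - ins.getD ii 0))]
        ring
      · rw [if_neg hlt, if_neg (fun hc => hlt hc.2.2.2)]; simp
    · have hA : ¬ (k - (ii : Int) > 0 ∧ ii < ins.length ∧ ii < outs.length) := by
        intro hc; obtain ⟨hc1, hc2, hc3⟩ := hc; exact h ⟨by omega, hc2, hc3⟩
      rw [if_neg hA, if_neg (fun hc => h ⟨hc.1, hc.2.1, hc.2.2.1⟩)]; simp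

-- B's linear insertion produces a ≤-sorted permutation of x :: inside
theorem pvB_insert_perm (ins : List Int) (x : Int) :
    (ins.take (pvB_insertPos ins x) ++ x :: ins.drop (pvB_insertPos ins x)).Perm (x :: ins) := by
  have := List.perm_middle (a := x) (l₁ := ins.take (pvB_insertPos ins x)) (l₂ := ins.drop (pvB_insertPos ins x))
  simpa [List.take_append_drop] using this

theorem pvB_insert_sorted (ins : List Int) (x : Int)
    (hs : ins.Pairwise (fun a b => a ≤ b)) :
    (ins.take (pvB_insertPos ins x) ++ x :: ins.drop (pvB_insertPos ins x)).Pairwise (fun a b => a ≤ b) := by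
  induction ins with
  | nil => simp [pvB_insertPos]
  | cons y t ih =>
    rcases List.pairwise_cons.mp hs with ⟨hy, ht⟩
    by_cases hyx : y ≤ x
    · simp only [pvB_insertPos, if_pos hyx, List.take_succ_cons, List.drop_succ_cons,
        List.cons_append]
      rw [List.pairwise_cons]
      refine ⟨?_, ih ht⟩
      intro a ha
      rcases (List.mem_append.mp ha) with h | h
      · exact hy a (List.mem_of_mem_take h)
      · rcases List.mem_cons.mp h with rfl | h
        · exact hyx
        · exact hy a (List.mem_of_mem_drop h)
    · simp only [pvB_insertPos, if_neg hyx, List.take_zero, List.drop_zero, List.nil_append]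
      rw [List.pairwise_cons]
      exact ⟨fun a ha => by
        rcases List.mem_cons.mp ha with rfl | h
        · omega
        · exact le_trans (by omega) (hy a h), hs⟩

-- uniqueness of a ≤-sorted (resp. ≥-sorted) arrangement of a multiset of ints
theorem pvSortedAsc_unique (l m : List Int) (hp : l.Perm m)
    (hl : l.Pairwise (fun a b : Int => a ≤ b)) (hm : m.Pairwise (fun a b : Int => a ≤ b)) : l = m :=
  List.eq_of_perm_of_sorted (fun a b _ _ h1 h2 => le_antisymm h1 h2) hl hm hp

theorem pvSortedDesc_unique (l m : List Int) (hp : l.Perm m)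
    (hl : l.Pairwise (fun a b : Int => b ≤ a)) (hm : m.Pairwise (fun a b : Int => b ≤ a)) : l = m :=
  List.eq_of_perm_of_sorted (fun a b _ _ h1 h2 => le_antisymm h2 h1) hl hm hp

-- max-update agreement
theorem pvBest_eq (best : Option Int) (s : Int) :
    (some (match best with | none => s | some m => max m s) : Option Int) =
    (match best with | none => some s | some m => if s > m then some s else some m) := by
  cases best with
  | none => rfl
  | some m => simp only [max_def]; split_ifs <;> simp_all <;> omega

-- the inner loops agree under the loop invariant
theorem pvJloop_eq (k : Int) (arr : List Int) (i : Nat) : ∀ (cnt j : Nat)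
    (current inside outside : List Int) (isum : Int) (best : Option Int),
    j + cnt ≤ arr.length → i ≤ j →
    current = (arr.drop i).take (j - i) →
    inside = PySem.List.sorted current (fun x => x) false →
    isum = current.sum →
    outside.Pairwise (fun a b : Int => b ≤ a) →
    outside.Perm (arr.take i ++ arr.drop j) →
    pvA_jloop k arr i cnt j current best = pvB_jloop k arr cnt j inside isum outside best := by
  intro cnt
  induction cnt with
  | zero => intro _ _ _ _ _ _ _ _ _ _ _ _ _; rfl
  | succ cnt ih =>
    intro j current inside outside isum best hjlen hij hcur hins hsum hops hope
    have hjlt : j < arr.length := by omega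
    simp only [pvA_jloop, pvB_jloop]
    set x := arr.getD j 0 with hx
    have hxel : x = arr[j] := by
      rw [hx, List.getD_eq_getElem?_getD, List.getElem?_eq_getElem hjlt]; rfl
    -- the element entering the subarray is the head of arr.drop j
    have hdropj : arr.drop j = x :: arr.drop (j+1) := by
      rw [List.drop_eq_getElem_cons hjlt, hxel]
    -- current' = current ++ [x] is the next prefix of the subarray
    have hcur' : current ++ [x] = (arr.drop i).take (j + 1 - i) := by
      rw [hcur]
      have h1 : j + 1 - i = (j - i) + 1 := by omega
      rw [h1, List.take_succ]
      have h2 : (arr.drop i)[j - i]? = some x := by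
        rw [List.getElem?_drop]
        have : i + (j - i) = j := by omega
        rw [this, List.getElem?_eq_getElem hjlt, hxel]
      rw [h2]; rfl
    -- B removes x from outside: result is outside.erase x
    have hxmem : x ∈ outside := hope.mem_iff.mpr (by
      rw [List.mem_append, hdropj]; exact Or.inr (List.mem_cons_self))
    have hrem : (PySem.List.remove? outside x).getD outside = outside.erase x := by
      rw [PySem.List.remove?_eq_some_erase outside x hxmem]; rfl
    -- the erased outside is the ≥-sorted arrangement of take i ++ drop (j+1)
    have hops' : (outside.erase x).Pairwise (fun a b : Int => b ≤ a) :=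
      List.Pairwise.sublist (List.erase_sublist) hops
    have hope' : (outside.erase x).Perm (arr.take i ++ arr.drop (j+1)) := by
      have h1 : (arr.take i ++ arr.drop j).Perm (x :: (arr.take i ++ arr.drop (j+1))) := by
        rw [hdropj]; exact List.perm_middle
      have h2 := (hope.trans h1).erase x
      simpa using h2
    have houtA : PySem.List.sorted
        (PySem.List.slice arr none (some (i : Int)) ++ PySem.List.slice arr (some ((j : Int) + 1)) none)
        (fun x => x) true = outside.erase x := by
      have hsl : PySem.List.slice arr none (some (i : Int)) ++ PySem.List.slice arr (some ((j : Int) + 1)) none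
          = arr.take i ++ arr.drop (j+1) := by
        rw [PySem.List.slice_to_natCast]
        have : ((j : Int) + 1) = ((j + 1 : Nat) : Int) := by push_cast; ring
        rw [this, PySem.List.slice_from_natCast]
      rw [hsl]
      refine pvSortedDesc_unique _ _ ?_ ?_ hops'
      · exact (PySem.List.sorted_perm _ _ _).trans hope'.symm
      · exact PySem.List.sorted_pairwise_rev _ _
    -- A's sorted inside is B's incremental insertion
    have hinsB : PySem.List.insert inside ((pvB_insertPos inside x : Nat) : Int) x =
        PySem.List.sorted (current ++ [x]) (fun x => x) false := by
      rw [pvInsert_natCast]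
      refine pvSortedAsc_unique _ _ ?_ (pvB_insert_sorted inside x (by
        rw [hins]; exact PySem.List.sorted_pairwise current (fun x : Int => x)))
        (PySem.List.sorted_pairwise (current ++ [x]) (fun x : Int => x))
      have h1 : (inside.take (pvB_insertPos inside x) ++ x :: inside.drop (pvB_insertPos inside x)).Perm
          (x :: inside) := pvB_insert_perm inside x
      refine h1.trans ?_
      have h2 : inside.Perm current := by rw [hins]; exact PySem.List.sorted_perm current (fun x : Int => x) false
      have h3 : (x :: inside).Perm (x :: current) := h2.cons x
      exact h3.trans ((List.perm_append_singleton x current).symm.trans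
        (PySem.List.sorted_perm (current ++ [x]) (fun x : Int => x) false).symm)
    -- sums
    have hsum' : isum + x = (current ++ [x]).sum := by rw [hsum]; simp
    -- the two bodies produce the same s / total and the same best
    rw [houtA, hinsB, hrem]
    have hswap : (pvA_swap (PySem.List.sorted (current ++ [x]) (fun x => x) false).length
        (PySem.List.sorted (current ++ [x]) (fun x => x) false) (outside.erase x) k 0 0).sum
        = isum + x + pvB_gain (PySem.List.sorted (current ++ [x]) (fun x => x) false).length
            (PySem.List.sorted (current ++ [x]) (fun x => x) false) (outside.erase x) k 0 0 := by
      have h0 := pvA_swap_sum (PySem.List.sorted (current ++ [x]) (fun x => x) false).length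
        (PySem.List.sorted (current ++ [x]) (fun x => x) false) (outside.erase x) k 0
      have hss : (PySem.List.sorted (current ++ [x]) (fun x => x) false).sum = (current ++ [x]).sum :=
        (PySem.List.sorted_perm (current ++ [x]) (fun x => x) false).sum_eq
      simp only [Nat.cast_zero, sub_zero] at h0
      rw [h0, hss, ← hsum']
    rw [hswap, pvBest_eq best (isum + x + pvB_gain
      (PySem.List.sorted (current ++ [x]) (fun x => x) false).length
      (PySem.List.sorted (current ++ [x]) (fun x => x) false) (outside.erase x) k 0 0)]
    exact ih (j+1) (current ++ [x]) _ (outside.erase x) (isum + x) _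
      (by omega) (by omega) hcur' rfl (by rw [hsum']) hops' hope'

theorem pvIloop_eq (k : Int) (arr : List Int) : ∀ (cnt i : Nat) (best : Option Int),
    i + cnt ≤ arr.length →
    pvA_iloop k arr cnt i best = pvB_iloop k arr cnt i best := by
  intro cnt
  induction cnt with
  | zero => intro _ _ _; rfl
  | succ cnt ih =>
    intro i best hlen
    simp only [pvA_iloop, pvB_iloop]
    rw [pvJloop_eq k arr i (cnt+1) i [] [] (PySem.List.sorted arr (fun x => x) true) 0 best
      (by omega) (le_refl i) (by simp) (by rw [(PySem.List.sorted_eq_nil_iff ([] : List Int) _ false).mpr rfl]) (by simp)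
      (PySem.List.sorted_pairwise_rev arr (fun x => x))
      ((PySem.List.sorted_perm arr (fun x => x) true).trans (by
        rw [List.take_append_drop]))]
    exact ih (i+1) _ (by omega)

-- ===== VERDICT (by name: the statement is the Claim_ definition above) =====
theorem max_mss_with_k_swaps_spec : Claim_equal_max_mss_with_k_swaps := by
  intro n k arr _ hpre
  unfold Spec_max_mss_with_k_swaps max_mss_with_k_swaps max_mss_with_k_swaps_alt
  rw [pvIloop_eq k arr n.toNat 0 none (by
    rcases hpre with ⟨h1, h2⟩; omega)]
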